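-- pv_equiv track=rewrite | github.com/DDongYul/AlgorithmStudy | implement/구현-우선순위큐 사용-디팬스게임-프로그래머스.py | solution
-- ===== SOURCE A (Python) =====
-- from heapq import heappush,heappop,heapify
--
-- def solution(n, k, enemy):
--     if k>=len(enemy):
--         return len(enemy)
--     idx = 0
--     sum_enemy = 0
--     enemy2 = []
--     while k>=0:
--         if k > 0:
--             while sum_enemy<=n:
--                 sum_enemy += enemy[idx]
--                 heappush(enemy2,-enemy[idx])
--                 idx+=1
--                 if idx == len(enemy):
--                     return idx
--                     # if sum_enemy<=n:
--                     #     return idx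
--                     # else:
--                     #     return idx-1
--             pro = -(heappop(enemy2))
--             sum_enemy -= pro
--             k-=1
--         if k == 0:
--             while sum_enemy<=n:
--                 sum_enemy += enemy[idx]
--                 idx+=1
--                 if idx == len(enemy):
--                     # return idx
--                     if sum_enemy<=n:
--                         return idx
--                     else:
--                         return idx-1
--             return idx-1
-- ===== SOURCE B (Python) =====
-- import heapq
--
-- def solution(n, k, enemy):
--     # canonical defense-game solution: keep the k largest waves seen so far in a
--     # bounded min-heap (these are the skipped ones); every other wave is paid
--     # for with health the moment the heap overflows.
--     heap = []
--     for i, e in enumerate(enemy):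
--         heapq.heappush(heap, e)
--         if len(heap) > k:
--             n -= heapq.heappop(heap)
--         if n < 0:
--             return i
--     return len(enemy)
-- ===== Notes on version B (the rewrite author's own statement) =====
-- stated objective: simpler
-- what changed: A's three nested while-loops (absorb until overflow, then pop the global maximum from a negated max-heap of everything absorbed, staged over k+1 phases) are replaced by the canonical one-loop solution that maintains only a bounded min-heap of the k largest waves seen so far and pays for the smallest retained wave whenever the heap overflows.
-- outside the precondition, e.g. on solution(0, 1, [1, -4, 4, 2]): A returns 3, B returns 4; on solution(-1, 0, [1]): A returns -1, B returns 0; on solution(0, -1, [1]): A returns None, B returns 0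
import Mathlib
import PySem

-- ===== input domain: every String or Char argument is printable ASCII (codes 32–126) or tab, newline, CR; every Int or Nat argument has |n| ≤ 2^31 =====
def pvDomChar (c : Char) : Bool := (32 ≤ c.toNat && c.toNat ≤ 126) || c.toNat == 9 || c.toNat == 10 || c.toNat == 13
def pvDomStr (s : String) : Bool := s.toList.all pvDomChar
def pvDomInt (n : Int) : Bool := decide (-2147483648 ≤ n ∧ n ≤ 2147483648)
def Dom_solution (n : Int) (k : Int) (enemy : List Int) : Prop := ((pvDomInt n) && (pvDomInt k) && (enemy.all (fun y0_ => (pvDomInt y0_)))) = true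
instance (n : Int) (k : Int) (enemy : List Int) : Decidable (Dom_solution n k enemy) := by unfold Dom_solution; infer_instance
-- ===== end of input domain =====

-- B replaces A's staged absorb/pop-global-max phases over a negated max-heap of every
-- absorbed wave by the canonical one-loop solution keeping only a bounded min-heap of the
-- k largest waves seen so far; objective: simpler.

-- ===== PORT A =====
-- Python A's `heapq` min-heap, modelled as an ascending sorted list: `heappush` = ordered
-- insert, `heappop` = take the head.  Exact for this program: only the minimum is observed.
def solA_push (hp : List Int) (x : Int) : List Int := List.orderedInsert (· ≤ ·) x hp

-- the inner `while sum<=n` of the `k > 0` branch; `none` = the early `return idx` (idx = len)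
def solA_fillK (n : Int) (enemy : List Int) (idx : Nat) (s : Int) (hp : List Int) :
    Option (Nat × Int × List Int) :=
  if s ≤ n then
    if h : idx < enemy.length then
      if idx + 1 = enemy.length then none
      else solA_fillK n enemy (idx + 1) (s + enemy[idx]) (solA_push hp (-enemy[idx]))
    else some (idx, s, hp)  -- dead: Python would raise IndexError here; never reached from `solution`
  else some (idx, s, hp)
  termination_by enemy.length - idx

-- the inner `while sum<=n` of the `k == 0` branch
def solA_fill0 (n : Int) (enemy : List Int) (idx : Nat) (s : Int) : Int :=
  if s ≤ n then
    if h : idx < enemy.length then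
      if idx + 1 = enemy.length then
        (if s + enemy[idx] ≤ n then ((idx : Int) + 1) else (idx : Int))
      else solA_fill0 n enemy (idx + 1) (s + enemy[idx])
    else (idx : Int) - 1  -- dead: IndexError in Python; never reached from `solution`
  else (idx : Int) - 1
  termination_by enemy.length - idx

-- the outer `while k >= 0`: every `k > 0` iteration ends with `k -= 1`, and the iteration
-- that reaches `k == 0` runs the final fill at once
def solA_phases (n : Int) (enemy : List Int) : Nat → Nat → Int → List Int → Int
  | 0, idx, s, _ => solA_fill0 n enemy idx s
  | kk + 1, idx, s, hp =>
    match solA_fillK n enemy idx s hp with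
    | none => (enemy.length : Int)
    | some (idx', s', hp') =>
      -- pro = -(heappop(enemy2)); sum -= pro; k -= 1   (headD's default is dead: heap nonempty)
      solA_phases n enemy kk idx' (s' - (-(hp'.headD 0))) hp'.tail

def solution (n : Int) (k : Int) (enemy : List Int) : Int :=
  if k ≥ (enemy.length : Int) then (enemy.length : Int)
  else if k < 0 then 0  -- Python falls off `while k>=0` and returns None; excluded by Pre_solution
  else solA_phases n enemy k.toNat 0 0 []

-- ===== PORT B =====
-- B's `heapq` min-heap, modelled the same way: ascending sorted list, `heappush` =
-- `List.orderedInsert`, `heappop` = take the head (exact: a heap pop yields the minimum).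
-- the `for i, e in enumerate(enemy)` loop of Source B, carrying the mutated `n` and `heap`
def solBgo (k : Int) (enemy : List Int) (i : Nat) (ncur : Int) (heap : List Int) : Int :=
  if h : i < enemy.length then
    let hp := List.orderedInsert (· ≤ ·) enemy[i] heap
    let st := if (hp.length : Int) > k then (ncur - hp.headD 0, hp.tail) else (ncur, hp)
    if st.1 < 0 then (i : Int) else solBgo k enemy (i + 1) st.1 st.2
  else (enemy.length : Int)
  termination_by enemy.length - i

def solution_alt (n : Int) (k : Int) (enemy : List Int) : Int :=
  solBgo k enemy 0 n []

-- ===== PRECONDITION & SPEC =====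
-- Pre_ excludes negative n and negative k, where A returns no usable value (None, the
-- out-of-range round -1, or an IndexError), and lists containing a negative wave size
-- when 0 < k < len(enemy): negative waves are outside the defense game's domain, there
-- which waves to skip is underdetermined and A's lazy spending order is accidental.
def Pre_solution (n : Int) (k : Int) (enemy : List Int) : Prop :=
  0 ≤ n ∧ 0 ≤ k ∧ (k = 0 ∨ (enemy.length : Int) ≤ k ∨ ∀ x ∈ enemy, 0 ≤ x)
instance (n : Int) (k : Int) (enemy : List Int) : Decidable (Pre_solution n k enemy) := by
  unfold Pre_solution; infer_instance
def pvWitness_solution : Int × Int × List Int := (7, 1, [4, 2, 4, 8, 3, 6, 1])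

def Spec_solution (n : Int) (k : Int) (enemy : List Int) (out : Int) : Prop := out = solution_alt n k enemy
instance (n : Int) (k : Int) (enemy : List Int) (out : Int) : Decidable (Spec_solution n k enemy out) := by unfold Spec_solution; infer_instance

-- ===== CLAIM (what is proved, stated in full; the proofs are below) =====
def Claim_equal_solution : Prop := ∀ (n : Int) (k : Int) (enemy : List Int), Dom_solution n k enemy → Pre_solution n k enemy → Spec_solution n k enemy (solution n k enemy)

-- ===== LEMMAS AND PROOFS =====

-- ---- stage 1: A equals the lazy single pass `pvLazyGo` (spend a skip on the current
-- ---- maximum only when the running sum overflows) ----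

def pvIns (kept : List Int) (e : Int) : List Int := List.orderedInsert (· ≤ ·) e kept

def pvLazyGo (n : Int) (enemy : List Int) (kk : Int) (i : Nat) (total : Int) (kept : List Int) : Int :=
  if h : i < enemy.length then
    if i + 1 = enemy.length then
      (if kk > 0 ∨ total + enemy[i] ≤ n then (enemy.length : Int) else (enemy.length : Int) - 1)
    else if total + enemy[i] > n then
      (if kk ≤ 0 then (i : Int)
       else pvLazyGo n enemy (kk - 1) (i + 1)
              (total + enemy[i] - (pvIns kept enemy[i]).getLastD 0)
              (pvIns kept enemy[i]).dropLast)
    else pvLazyGo n enemy kk (i + 1) (total + enemy[i]) (pvIns kept enemy[i])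
  else (enemy.length : Int)
  termination_by enemy.length - i

-- the "heap view" of the lazy pass's sorted list: A's heap of negated values, smallest (= -max) first
def pvRel (kept : List Int) : List Int := (kept.map (fun x => -x)).reverse

lemma pvRel_sorted {kept : List Int} (h : List.Pairwise (· ≤ ·) kept) :
    List.Pairwise (· ≤ ·) (pvRel kept) := by
  simp only [pvRel, List.pairwise_reverse, List.pairwise_map]
  exact h.imp (by intro a b hab; omega)

lemma pvRel_insort {kept : List Int} (h : List.Pairwise (· ≤ ·) kept) (e : Int) :
    solA_push (pvRel kept) (-e) = pvRel (pvIns kept e) := by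
  have p1 : (pvRel kept).Perm (kept.map (fun x => -x)) := List.reverse_perm _
  have p2 : ((e :: kept).map (fun x => -x)).Perm
      ((List.orderedInsert (· ≤ ·) e kept).map (fun x => -x)) :=
    ((List.perm_orderedInsert _ e kept).map _).symm
  have p3 : ((List.orderedInsert (· ≤ ·) e kept).map (fun x => -x)).Perm
      (pvRel (pvIns kept e)) := (List.reverse_perm _).symm
  have hperm : (solA_push (pvRel kept) (-e)).Perm (pvRel (pvIns kept e)) :=
    (List.perm_orderedInsert _ _ _).trans ((p1.cons (-e)).trans (p2.trans p3))
  exact hperm.eq_of_pairwise (fun a b _ _ h1 h2 => by omega)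
    (List.Pairwise.orderedInsert _ _ (pvRel_sorted h))
    (pvRel_sorted (List.Pairwise.orderedInsert _ _ h))

lemma pvRel_headD {kept : List Int} (h : kept ≠ []) :
    (pvRel kept).headD 0 = -(kept.getLastD 0) := by
  rcases kept.eq_nil_or_concat with rfl | ⟨l, b, rfl⟩
  · exact absurd rfl h
  · simp [pvRel, List.concat_eq_append]

lemma pvRel_tail (kept : List Int) : (pvRel kept).tail = pvRel kept.dropLast := by
  rcases kept.eq_nil_or_concat with rfl | ⟨l, b, rfl⟩
  · rfl
  · simp [pvRel, List.concat_eq_append]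

lemma pv_le_getLastD {kept : List Int} (hs : List.Pairwise (· ≤ ·) kept) {x : Int}
    (hx : x ∈ kept) : x ≤ kept.getLastD 0 := by
  rcases kept.eq_nil_or_concat with rfl | ⟨l, b, rfl⟩
  · simp at hx
  · simp only [List.concat_eq_append, List.getLastD_concat]
    rw [List.concat_eq_append, List.pairwise_append] at hs
    rw [List.concat_eq_append] at hx
    rcases List.mem_append.1 hx with hl | hb
    · exact hs.2.2 x hl b (List.mem_singleton_self b)
    · simp at hb; omega

lemma orderedInsert_ne_nil (e : Int) (l : List Int) :
    List.orderedInsert (· ≤ ·) e l ≠ [] := by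
  intro hc
  have := (List.perm_orderedInsert (· ≤ ·) e l).length_eq
  simp [hc] at this

-- with a skip still in hand for every remaining wave, the lazy pass survives everything
lemma pvLazy_big (n : Int) (enemy : List Int) (kk : Int) (i : Nat) (total : Int) (kept : List Int)
    (hk : (enemy.length : Int) - i ≤ kk) : pvLazyGo n enemy kk i total kept = enemy.length := by
  rw [pvLazyGo]
  split
  · rename_i hi
    split
    · rename_i hlast
      rw [if_pos (Or.inl (by omega))]
    · rename_i hlast
      have hi2 : i + 1 < enemy.length := by omega
      split
      · rw [if_neg (by omega)]
        exact pvLazy_big n enemy (kk - 1) (i + 1) _ _ (by omega)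
      · exact pvLazy_big n enemy kk (i + 1) _ _ (by omega)
  · rfl
termination_by enemy.length - i

-- the k == 0 phase: A's final fill against the lazy pass with no skips left
lemma pv_phase0_eq (n : Int) (enemy : List Int) (idx : Nat) (s : Int) (kept : List Int)
    (hidx : idx < enemy.length) (hs : s ≤ n) :
    solA_fill0 n enemy idx s = pvLazyGo n enemy 0 idx s kept := by
  rw [solA_fill0, pvLazyGo, dif_pos hidx, if_pos hs, dif_pos hidx]
  by_cases hlast : idx + 1 = enemy.length
  · rw [if_pos hlast, if_pos hlast]
    have h1 : ((idx : Int) + 1) = (enemy.length : Int) := by omega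
    by_cases h2 : s + enemy[idx] ≤ n
    · rw [if_pos h2, if_pos (Or.inr h2)]; omega
    · rw [if_neg h2, if_neg (by omega)]; omega
  · rw [if_neg hlast, if_neg hlast]
    by_cases h2 : s + enemy[idx] ≤ n
    · rw [if_neg (by omega), pv_phase0_eq n enemy (idx + 1) _ (pvIns kept enemy[idx])
          (by omega) h2]
    · rw [if_pos (by omega), if_pos (by omega), solA_fill0, if_neg h2]
      omega
termination_by enemy.length - idx

-- phase-by-phase simulation: A's current phase (kk skips still owed) against the lazy pass
lemma pv_phase_eq (n : Int) (enemy : List Int) (kk idx : Nat) (s : Int) (kept : List Int)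
    (hidx : idx < enemy.length) (hs : s ≤ n) (hsort : List.Pairwise (· ≤ ·) kept) :
    solA_phases n enemy kk idx s (pvRel kept) = pvLazyGo n enemy (kk : Int) idx s kept := by
  match kk with
  | 0 => exact pv_phase0_eq n enemy idx s kept hidx hs
  | kk' + 1 =>
    rw [solA_phases, solA_fillK, if_pos hs, dif_pos hidx]
    by_cases hlast : idx + 1 = enemy.length
    · rw [if_pos hlast, pvLazyGo, dif_pos hidx, if_pos hlast,
        if_pos (Or.inl (by push_cast; omega))]
    · rw [if_neg hlast]
      have hidx2 : idx + 1 < enemy.length := by omega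
      have hins : solA_push (pvRel kept) (-enemy[idx]) = pvRel (pvIns kept enemy[idx]) :=
        pvRel_insort hsort enemy[idx]
      have hsort' : List.Pairwise (· ≤ ·) (pvIns kept enemy[idx]) :=
        List.Pairwise.orderedInsert _ _ hsort
      rw [hins]
      by_cases h2 : s + enemy[idx] ≤ n
      · -- the fill loop keeps absorbing: step both sides one element
        have hA : (match solA_fillK n enemy (idx + 1) (s + enemy[idx])
              (pvRel (pvIns kept enemy[idx])) with
            | none => (enemy.length : Int)
            | some (idx', s', hp') =>
              solA_phases n enemy kk' idx' (s' - (-(hp'.headD 0))) hp'.tail)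
            = solA_phases n enemy (kk' + 1) (idx + 1) (s + enemy[idx])
                (pvRel (pvIns kept enemy[idx])) := by
          rw [solA_phases]
        rw [hA, pv_phase_eq n enemy (kk' + 1) (idx + 1) _ _ hidx2 h2 hsort']
        conv_rhs => rw [pvLazyGo]
        rw [dif_pos hidx, if_neg hlast, if_neg (by omega)]
      · -- overflow: A pops the max (head of the negated heap), the lazy pass pops the last of `kept`
        rw [solA_fillK, if_neg h2]
        have hne : pvIns kept enemy[idx] ≠ [] := orderedInsert_ne_nil _ _
        have hmem : enemy[idx] ∈ pvIns kept enemy[idx] :=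
          (List.mem_orderedInsert _).2 (Or.inl rfl)
        have hle : enemy[idx] ≤ (pvIns kept enemy[idx]).getLastD 0 :=
          pv_le_getLastD hsort' hmem
        have hsd : List.Pairwise (· ≤ ·) (pvIns kept enemy[idx]).dropLast :=
          List.Pairwise.sublist (List.dropLast_sublist _) hsort'
        have hred : (match some (idx + 1, s + enemy[idx], pvRel (pvIns kept enemy[idx])) with
            | none => ((enemy.length : Nat) : Int)
            | some (idx', s', hp') => solA_phases n enemy kk' idx' (s' - -hp'.headD 0) hp'.tail)
            = solA_phases n enemy kk' (idx + 1)
                (s + enemy[idx] - -((pvRel (pvIns kept enemy[idx])).headD 0))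
                (pvRel (pvIns kept enemy[idx])).tail := rfl
        rw [hred, pvRel_headD hne, pvRel_tail,
          pv_phase_eq n enemy kk' (idx + 1) _ _ hidx2 (by omega) hsd]
        conv_rhs => rw [pvLazyGo]
        rw [dif_pos hidx, if_neg hlast, if_pos (by omega), if_neg (by push_cast; omega)]
        have hc : ((kk' + 1 : Nat) : Int) - 1 = (kk' : Nat) := by push_cast; ring
        rw [hc]
        ring_nf
termination_by (kk, enemy.length - idx)

-- A equals the lazy single pass (on nonnegative k, and nonnegative n unless k ≥ len)
lemma pv_solution_lazy (n k : Int) (enemy : List Int) (hk : 0 ≤ k)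
    (hn' : 0 ≤ n ∨ (enemy.length : Int) ≤ k) :
    solution n k enemy = pvLazyGo n enemy k 0 0 [] := by
  unfold solution
  by_cases hbig : k ≥ (enemy.length : Int)
  · rw [if_pos hbig, pvLazy_big n enemy k 0 0 [] (by omega)]
  · have hn : 0 ≤ n := hn'.resolve_right hbig
    rw [if_neg hbig, if_neg (by omega)]
    have hlen : 0 < enemy.length := by omega
    have h0 : pvRel [] = [] := rfl
    have := pv_phase_eq n enemy k.toNat 0 0 [] hlen hn List.Pairwise.nil
    rw [h0] at this
    rw [this, Int.toNat_of_nonneg hk]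

-- ---- stage 2: sorted-list toolbox for the exchange argument ----

lemma pvOI_append_of_forall (e : Int) :
    ∀ (q : Nat) (S : List Int), q ≤ S.length → (∀ y ∈ S.take q, ¬ e ≤ y) →
      List.orderedInsert (· ≤ ·) e S = S.take q ++ List.orderedInsert (· ≤ ·) e (S.drop q) := by
  intro q
  induction q with
  | zero => intro S _ _; simp
  | succ q ih =>
    intro S hq hall
    match S with
    | [] => simp at hq
    | x :: S' =>
      have hx : ¬ e ≤ x := hall x (by simp)
      have hstep : List.orderedInsert (· ≤ ·) e (x :: S')
          = x :: List.orderedInsert (· ≤ ·) e S' := by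
        simp [List.orderedInsert, hx]
      rw [hstep, List.take_succ_cons, List.drop_succ_cons,
        ih S' (by simpa using hq) (fun y hy => hall y (by simp [hy]))]
      simp

lemma pvOI_append_of_exists (e : Int) :
    ∀ (q : Nat) (S : List Int), List.Pairwise (· ≤ ·) S → q ≤ S.length →
      (∃ y ∈ S.take q, e ≤ y) →
      List.orderedInsert (· ≤ ·) e S = List.orderedInsert (· ≤ ·) e (S.take q) ++ S.drop q := by
  intro q S
  induction S generalizing q with
  | nil => intro _ _ hC; simp at hC ⊢
  | cons x S' ih =>
    intro hS hq hC
    match q with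
    | 0 => simp at hC
    | q' + 1 =>
      by_cases hex : e ≤ x
      · simp [List.orderedInsert, hex, List.take_succ_cons]
      · obtain ⟨y, hy, hey⟩ := hC
        have hy' : y ∈ S'.take q' := by
          rcases (by simpa [List.take_succ_cons] using hy : y = x ∨ y ∈ S'.take q') with rfl | h
          · exact absurd hey hex
          · exact h
        have hstep : List.orderedInsert (· ≤ ·) e (x :: S')
            = x :: List.orderedInsert (· ≤ ·) e S' := by
          simp [List.orderedInsert, hex]
        have hstep2 : List.orderedInsert (· ≤ ·) e (x :: S'.take q')
            = x :: List.orderedInsert (· ≤ ·) e (S'.take q') := by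
          simp [List.orderedInsert, hex]
        rw [hstep, List.take_succ_cons, List.drop_succ_cons, hstep2, List.cons_append,
          ih q' (List.Pairwise.sublist (List.sublist_cons_self _ _) hS) (by simpa using hq)
            ⟨y, hy', hey⟩]

lemma pvOI_drop_cons (e : Int) (q : Nat) (S : List Int) (hS : List.Pairwise (· ≤ ·) S)
    (hC : ∃ y ∈ S.take q, e ≤ y) :
    List.orderedInsert (· ≤ ·) e (S.drop q) = e :: S.drop q := by
  obtain ⟨y, hy, hey⟩ := hC
  cases hd : S.drop q with
  | nil => simp [List.orderedInsert]
  | cons z t =>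
    have hz : z ∈ S.drop q := by simp [hd]
    have hS2 := hS
    rw [← List.take_append_drop q S, List.pairwise_append] at hS2
    have hyz : y ≤ z := hS2.2.2 y hy z hz
    simp [List.orderedInsert, le_trans hey hyz]

lemma pvOI_concat (e : Int) (T : List Int) (hall : ∀ y ∈ T, ¬ e ≤ y) :
    List.orderedInsert (· ≤ ·) e T = T ++ [e] := by
  have h := pvOI_append_of_forall e T.length T (le_refl _)
    (fun y hy h => hall y (by simpa [List.take_length] using hy) h)
  simpa [List.take_length, List.drop_length, List.orderedInsert] using h

lemma pvOI_length (e : Int) (l : List Int) :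
    (List.orderedInsert (· ≤ ·) e l).length = l.length + 1 :=
  (List.perm_orderedInsert (· ≤ ·) e l).length_eq

lemma pvOI_sum (e : Int) (l : List Int) :
    (List.orderedInsert (· ≤ ·) e l).sum = e + l.sum :=
  (List.perm_orderedInsert (· ≤ ·) e l).sum_eq

lemma pv_take_succ_sum (S : List Int) (q : Nat) (hq : q < S.length) :
    (S.take (q + 1)).sum = (S.take q).sum + (S.drop q).headD 0 := by
  have h1 : S.take (q + 1) = S.take q ++ [S[q]] := by
    rw [List.take_succ, List.getElem?_eq_getElem hq]; rfl
  have h2 : S.drop q = S[q] :: S.drop (q + 1) := List.drop_eq_getElem_cons hq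
  rw [h1, List.sum_append, h2]
  show (List.take q S).sum + List.sum [S[q]] = (List.take q S).sum + S[q]
  simp

lemma pv_take_sum_mono (S : List Int) (a b : Nat) (hab : a ≤ b)
    (hpos : ∀ x ∈ S, 0 ≤ x) : (S.take a).sum ≤ (S.take b).sum := by
  have hb : b = a + (b - a) := by omega
  rw [hb, List.take_add, List.sum_append]
  have : 0 ≤ (List.take (b - a) (S.drop a)).sum :=
    List.sum_nonneg (fun x hx => hpos x (List.mem_of_mem_drop (List.mem_of_mem_take hx)))
  omega

lemma pv_sum_dropLast (l : List Int) (h : l ≠ []) :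
    l.sum = l.dropLast.sum + l.getLastD 0 := by
  rcases l.eq_nil_or_concat with rfl | ⟨l', b, rfl⟩
  · exact absurd rfl h
  · simp [List.concat_eq_append]

lemma pv_ins_take_sum_le (e : Int) (S : List Int) (q : Nat) (hS : List.Pairwise (· ≤ ·) S)
    (hq : q ≤ S.length) :
    ((List.orderedInsert (· ≤ ·) e S).take q).sum ≤ (S.take q).sum := by
  have hTlen : (S.take q).length = q := by simp [List.length_take]; omega
  by_cases hC : ∃ y ∈ S.take q, e ≤ y
  · rw [pvOI_append_of_exists e q S hS hq hC]
    have hlen : (List.orderedInsert (· ≤ ·) e (S.take q)).length = q + 1 := by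
      rw [pvOI_length, hTlen]
    rw [List.take_append_of_le_length (by omega)]
    have hne : List.orderedInsert (· ≤ ·) e (S.take q) ≠ [] := orderedInsert_ne_nil _ _
    have hdl : (List.orderedInsert (· ≤ ·) e (S.take q)).take q
        = (List.orderedInsert (· ≤ ·) e (S.take q)).dropLast := by
      rw [List.dropLast_eq_take, hlen]
      norm_num
    have hsplit := pv_sum_dropLast _ hne
    rw [pvOI_sum] at hsplit
    have hge : e ≤ (List.orderedInsert (· ≤ ·) e (S.take q)).getLastD 0 :=
      pv_le_getLastD (List.Pairwise.orderedInsert _ _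
        (List.Pairwise.sublist (List.take_sublist _ _) hS))
        ((List.mem_orderedInsert _).2 (Or.inl rfl))
    rw [hdl]
    omega
  · rw [pvOI_append_of_forall e q S hq (fun y hy h => hC ⟨y, hy, h⟩),
      List.take_left' hTlen]

-- ---- stage 3: the eager bounded heap (B) against the lazy pass ----

-- one B step when the heap overflows: pushing e into the retained suffix and popping the
-- minimum lands exactly on the take/drop split of the new sorted prefix, one place further
lemma pv_pop_shift (e : Int) (S : List Int) (q : Nat)
    (hS : List.Pairwise (· ≤ ·) S) (hq : q ≤ S.length) :
    (List.orderedInsert (· ≤ ·) e (S.drop q)).tail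
        = (List.orderedInsert (· ≤ ·) e S).drop (q + 1) ∧
    (S.take q).sum + (List.orderedInsert (· ≤ ·) e (S.drop q)).headD 0
        = ((List.orderedInsert (· ≤ ·) e S).take (q + 1)).sum := by
  have hTlen : (S.take q).length = q := by simp [List.length_take]; omega
  by_cases hC : ∃ y ∈ S.take q, e ≤ y
  · have h3 := pvOI_drop_cons e q S hS hC
    have h2 := pvOI_append_of_exists e q S hS hq hC
    have hlen : (List.orderedInsert (· ≤ ·) e (S.take q)).length = q + 1 := by
      rw [pvOI_length, hTlen]
    constructor
    · rw [h3]
      simp only [List.tail_cons]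
      rw [h2, List.drop_left' hlen]
    · rw [h3]
      simp only [List.headD_cons]
      rw [h2, List.take_left' hlen, pvOI_sum]
      ring
  · have hall : ∀ y ∈ S.take q, ¬ e ≤ y := fun y hy h => hC ⟨y, hy, h⟩
    have h1 := pvOI_append_of_forall e q S hq hall
    constructor
    · conv_rhs => rw [← List.tail_drop]
      rw [h1, List.drop_left' hTlen]
    · have hlt : q < (List.orderedInsert (· ≤ ·) e S).length := by
        rw [pvOI_length]; omega
      rw [pv_take_succ_sum _ q hlt, h1, List.take_left' hTlen, List.drop_left' hTlen]

-- one lazy step when the sum overflows: inserting e into the kept prefix and popping the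
-- maximum keeps exactly the q smallest of the new sorted prefix, and re-establishes the guard
lemma pv_lazy_pop (n : Int) (e : Int) (S : List Int) (q : Nat)
    (hS : List.Pairwise (· ≤ ·) S) (hq : q ≤ S.length)
    (hguard : q < S.length → n < (S.take q).sum + (S.drop q).headD 0)
    (hover : n < (S.take q).sum + e) :
    (List.orderedInsert (· ≤ ·) e (S.take q)).dropLast
        = (List.orderedInsert (· ≤ ·) e S).take q ∧
    (S.take q).sum + e - (List.orderedInsert (· ≤ ·) e (S.take q)).getLastD 0
        = ((List.orderedInsert (· ≤ ·) e S).take q).sum ∧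
    n < ((List.orderedInsert (· ≤ ·) e S).take q).sum
        + ((List.orderedInsert (· ≤ ·) e S).drop q).headD 0 := by
  have hTlen : (S.take q).length = q := by simp [List.length_take]; omega
  have hlt : q < (List.orderedInsert (· ≤ ·) e S).length := by rw [pvOI_length]; omega
  have hscc := pv_take_succ_sum (List.orderedInsert (· ≤ ·) e S) q hlt
  by_cases hC : ∃ y ∈ S.take q, e ≤ y
  · have h2 := pvOI_append_of_exists e q S hS hq hC
    have hlen : (List.orderedInsert (· ≤ ·) e (S.take q)).length = q + 1 := by
      rw [pvOI_length, hTlen]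
    have htake1 : (List.orderedInsert (· ≤ ·) e S).take (q + 1)
        = List.orderedInsert (· ≤ ·) e (S.take q) := by
      rw [h2, List.take_left' hlen]
    have hdl : (List.orderedInsert (· ≤ ·) e (S.take q)).dropLast
        = (List.orderedInsert (· ≤ ·) e (S.take q)).take q := by
      rw [List.dropLast_eq_take, hlen]; norm_num
    have hts : (List.orderedInsert (· ≤ ·) e S).take q
        = (List.orderedInsert (· ≤ ·) e (S.take q)).take q := by
      rw [h2, List.take_append_of_le_length (by omega)]
    have hG1 : (List.orderedInsert (· ≤ ·) e (S.take q)).dropLast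
        = (List.orderedInsert (· ≤ ·) e S).take q := hdl.trans hts.symm
    have hsplit := pv_sum_dropLast _ (orderedInsert_ne_nil e (S.take q))
    rw [pvOI_sum, hG1] at hsplit
    have hs1 : ((List.orderedInsert (· ≤ ·) e S).take (q + 1)).sum = e + (S.take q).sum := by
      rw [htake1, pvOI_sum]
    exact ⟨hG1, by omega, by omega⟩
  · have hall : ∀ y ∈ S.take q, ¬ e ≤ y := fun y hy h => hC ⟨y, hy, h⟩
    have h1 := pvOI_append_of_forall e q S hq hall
    have hins_eq : List.orderedInsert (· ≤ ·) e (S.take q) = S.take q ++ [e] :=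
      pvOI_concat e (S.take q) hall
    have hG1 : (List.orderedInsert (· ≤ ·) e (S.take q)).dropLast
        = (List.orderedInsert (· ≤ ·) e S).take q := by
      rw [hins_eq, List.dropLast_concat, h1, List.take_left' hTlen]
    have hlast : (List.orderedInsert (· ≤ ·) e (S.take q)).getLastD 0 = e := by
      rw [hins_eq, List.getLastD_concat]
    have htq : ((List.orderedInsert (· ≤ ·) e S).take q).sum = (S.take q).sum := by
      rw [h1, List.take_left' hTlen]
    refine ⟨hG1, by omega, ?_⟩
    rw [h1, List.take_left' hTlen, List.drop_left' hTlen]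
    cases hdq : S.drop q with
    | nil =>
      simp only [List.orderedInsert, List.headD_cons]
      omega
    | cons z t =>
      have hqlt : q < S.length := by
        by_contra hge
        rw [List.drop_eq_nil_of_le (by omega)] at hdq
        simp at hdq
      have hz : (S.drop q).headD 0 = z := by rw [hdq]; rfl
      have hg := hguard hqlt
      by_cases hez : e ≤ z
      · simp only [List.orderedInsert, if_pos hez, List.headD_cons]
        omega
      · simp only [List.orderedInsert, if_neg hez, List.headD_cons]
        omega

-- one lazy step without overflow: the kept prefix just grows by e, and the guard persists
lemma pv_lazy_keep (n : Int) (e : Int) (S : List Int) (q : Nat)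
    (hS : List.Pairwise (· ≤ ·) S) (hq : q ≤ S.length) (he : 0 ≤ e)
    (hguard : q < S.length → n < (S.take q).sum + (S.drop q).headD 0)
    (hle : (S.take q).sum + e ≤ n) :
    List.orderedInsert (· ≤ ·) e (S.take q) = (List.orderedInsert (· ≤ ·) e S).take (q + 1) ∧
    (q + 1 < S.length + 1 → n < ((List.orderedInsert (· ≤ ·) e S).take (q + 1)).sum
        + ((List.orderedInsert (· ≤ ·) e S).drop (q + 1)).headD 0) := by
  have hTlen : (S.take q).length = q := by simp [List.length_take]; omega
  have hmain : List.orderedInsert (· ≤ ·) e (S.take q)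
        = (List.orderedInsert (· ≤ ·) e S).take (q + 1) ∧
      (List.orderedInsert (· ≤ ·) e S).drop (q + 1) = S.drop q := by
    by_cases hC : ∃ y ∈ S.take q, e ≤ y
    · have h2 := pvOI_append_of_exists e q S hS hq hC
      have hlen : (List.orderedInsert (· ≤ ·) e (S.take q)).length = q + 1 := by
        rw [pvOI_length, hTlen]
      exact ⟨by rw [h2, List.take_left' hlen], by rw [h2, List.drop_left' hlen]⟩
    · have hall : ∀ y ∈ S.take q, ¬ e ≤ y := fun y hy h => hC ⟨y, hy, h⟩
      have h1 := pvOI_append_of_forall e q S hq hall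
      rcases Nat.lt_or_ge q S.length with hqlt | hqge
      · have hdq := List.drop_eq_getElem_cons hqlt
        have hez : e ≤ S[q] := by
          have hg := hguard hqlt
          rw [hdq] at hg
          simp only [List.headD_cons] at hg
          omega
        have hins_drop : List.orderedInsert (· ≤ ·) e (S.drop q) = e :: S.drop q := by
          rw [hdq]
          simp [List.orderedInsert, hez]
        have hassoc : S.take q ++ e :: S.drop q = (S.take q ++ [e]) ++ S.drop q := by simp
        have hlen2 : (S.take q ++ [e]).length = q + 1 := by simp [hTlen]
        have hins_eq : List.orderedInsert (· ≤ ·) e (S.take q) = S.take q ++ [e] :=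
          pvOI_concat e (S.take q) hall
        constructor
        · rw [h1, hins_drop, hassoc, List.take_left' hlen2, hins_eq]
        · rw [h1, hins_drop, hassoc, List.drop_left' hlen2]
      · have hqe : q = S.length := by omega
        have hT : S.take q = S := List.take_of_length_le (by omega)
        have hlen3 : (List.orderedInsert (· ≤ ·) e S).length = q + 1 := by
          rw [pvOI_length]; omega
        constructor
        · rw [hT, List.take_of_length_le (by omega)]
        · rw [List.drop_eq_nil_of_le (by omega), List.drop_eq_nil_of_le (by omega)]
  refine ⟨hmain.1, ?_⟩
  intro hlt
  have hqlt : q < S.length := by omega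
  have hs1 : ((List.orderedInsert (· ≤ ·) e S).take (q + 1)).sum = e + (S.take q).sum := by
    rw [← hmain.1, pvOI_sum]
  have hg := hguard hqlt
  rw [hmain.2]
  omega

-- the main exchange simulation, all waves nonnegative: the lazy pass with j skips already
-- spent (on the j largest of the first i waves) equals B's eager pass from the same wave
lemma pv_main (n k : Int) (enemy : List Int) (_hn : 0 ≤ n) (hk : 0 ≤ k)
    (hpos : ∀ x ∈ enemy, 0 ≤ x) :
    ∀ (d i j : Nat) (S : List Int), enemy.length - i ≤ d →
      i ≤ enemy.length → (j : Int) ≤ k → j ≤ i →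
      List.Pairwise (· ≤ ·) S → S.Perm (enemy.take i) →
      (S.take (i - j)).sum ≤ n →
      (0 < j → n < (S.take (i - j)).sum + (S.drop (i - j)).headD 0) →
      pvLazyGo n enemy (k - j) i ((S.take (i - j)).sum) (S.take (i - j))
        = solBgo k enemy i (n - (S.take (i - min i k.toNat)).sum) (S.drop (i - min i k.toNat)) := by
  intro d
  induction d with
  | zero =>
    intro i j S hd hi _ _ _ _ _ _
    have hge : ¬ i < enemy.length := by omega
    rw [pvLazyGo, solBgo, dif_neg hge, dif_neg hge]
  | succ d ih =>
    intro i j S hd hi hjk hji hS hperm hsum hguard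
    by_cases hilen : i < enemy.length
    · have hSlen : S.length = i := by
        rw [hperm.length_eq, List.length_take]; omega
      have hSpos : ∀ x ∈ S, 0 ≤ x := fun x hx =>
        hpos x (List.mem_of_mem_take (hperm.subset hx))
      have he : (0 : Int) ≤ enemy[i] := hpos _ (List.getElem_mem _)
      have hS' : List.Pairwise (· ≤ ·) (List.orderedInsert (· ≤ ·) enemy[i] S) :=
        List.Pairwise.orderedInsert _ _ hS
      have hS'len : (List.orderedInsert (· ≤ ·) enemy[i] S).length = i + 1 := by
        rw [pvOI_length, hSlen]
      have hperm' : (List.orderedInsert (· ≤ ·) enemy[i] S).Perm (enemy.take (i + 1)) := by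
        have h1 : enemy.take (i + 1) = enemy.take i ++ [enemy[i]] := by
          rw [List.take_succ, List.getElem?_eq_getElem hilen]; rfl
        rw [h1]
        exact (List.perm_orderedInsert _ _ _).trans
          ((hperm.cons enemy[i]).trans (List.perm_append_singleton _ _).symm)
      have hS'pos : ∀ x ∈ List.orderedInsert (· ≤ ·) enemy[i] S, 0 ≤ x := fun x hx =>
        hpos x (List.mem_of_mem_take (hperm'.subset hx))
      have hkk : (k.toNat : Int) = k := Int.toNat_of_nonneg hk
      have hqS : i - j ≤ S.length := by omega
      have hinsle := pv_ins_take_sum_le enemy[i] S (i - j) hS hqS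
      -- B's one step, uniformly: either it dies at wave i, or it reaches wave i+1 in the
      -- eager state (heap = the min(i+1,k) largest, health = n minus the rest) of the
      -- (i+1)-prefix
      have hB : solBgo k enemy i (n - (S.take (i - min i k.toNat)).sum)
            (S.drop (i - min i k.toNat))
          = if n - ((List.orderedInsert (· ≤ ·) enemy[i] S).take (i + 1 - min (i + 1) k.toNat)).sum < 0
            then (i : Int)
            else solBgo k enemy (i + 1)
                   (n - ((List.orderedInsert (· ≤ ·) enemy[i] S).take (i + 1 - min (i + 1) k.toNat)).sum)
                   ((List.orderedInsert (· ≤ ·) enemy[i] S).drop (i + 1 - min (i + 1) k.toNat)) := by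
        rw [solBgo, dif_pos hilen]
        by_cases hik : k.toNat ≤ i
        · have hmin1 : i - min i k.toNat = i - k.toNat := by omega
          have hmin2 : i + 1 - min (i + 1) k.toNat = (i - k.toNat) + 1 := by omega
          obtain ⟨hptail, hpsum⟩ := pv_pop_shift enemy[i] S (i - k.toNat) hS (by omega)
          have hplen : ((List.orderedInsert (· ≤ ·) enemy[i] (S.drop (i - min i k.toNat))).length : Int)
              = (k.toNat : Int) + 1 := by
            rw [pvOI_length, List.length_drop, hSlen, hmin1]; push_cast; omega
          have hc : ((List.orderedInsert (· ≤ ·) enemy[i] (S.drop (i - min i k.toNat))).length : Int) > k := by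
            omega
          simp only [hc, if_true]
          rw [hmin2, ← hpsum]
          rw [hmin1]
          rw [hptail]
          have harith : n - (S.take (i - k.toNat)).sum
                - (List.orderedInsert (· ≤ ·) enemy[i] (S.drop (i - k.toNat))).headD 0
              = n - ((S.take (i - k.toNat)).sum
                + (List.orderedInsert (· ≤ ·) enemy[i] (S.drop (i - k.toNat))).headD 0) := by
            ring
          rw [harith]
        · have hmin1 : i - min i k.toNat = 0 := by omega
          have hmin2 : i + 1 - min (i + 1) k.toNat = 0 := by omega
          have hplen : ((List.orderedInsert (· ≤ ·) enemy[i] (S.drop (i - min i k.toNat))).length : Int)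
              = (i : Int) + 1 := by
            rw [pvOI_length, List.length_drop, hSlen, hmin1]; push_cast; omega
          have hnc : ¬ ((List.orderedInsert (· ≤ ·) enemy[i] (S.drop (i - min i k.toNat))).length : Int) > k := by
            omega
          simp only [hnc, if_false]
          rw [hmin1, hmin2]
          simp only [List.take_zero, List.drop_zero, List.sum_nil]
      rw [pvLazyGo, dif_pos hilen, hB]
      by_cases hlast : i + 1 = enemy.length
      · rw [if_pos hlast]
        by_cases hsurv : k - (j : Int) > 0 ∨ (S.take (i - j)).sum + enemy[i] ≤ n
        · rw [if_pos hsurv]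
          have hok : ((List.orderedInsert (· ≤ ·) enemy[i] S).take (i + 1 - min (i + 1) k.toNat)).sum ≤ n := by
            rcases hsurv with hkkpos | hle
            · have h1 : ((List.orderedInsert (· ≤ ·) enemy[i] S).take (i + 1 - min (i + 1) k.toNat)).sum
                  ≤ ((List.orderedInsert (· ≤ ·) enemy[i] S).take (i - j)).sum :=
                pv_take_sum_mono _ _ _ (by omega) hS'pos
              omega
            · obtain ⟨hK1, _⟩ := pv_lazy_keep n enemy[i] S (i - j) hS hqS he
                (fun h => hguard (by omega)) hle
              have h1 : ((List.orderedInsert (· ≤ ·) enemy[i] S).take ((i - j) + 1)).sum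
                  = enemy[i] + (S.take (i - j)).sum := by
                rw [← hK1, pvOI_sum]
              have h2 : ((List.orderedInsert (· ≤ ·) enemy[i] S).take (i + 1 - min (i + 1) k.toNat)).sum
                  ≤ ((List.orderedInsert (· ≤ ·) enemy[i] S).take ((i - j) + 1)).sum :=
                pv_take_sum_mono _ _ _ (by omega) hS'pos
              omega
          rw [if_neg (by omega), solBgo, dif_neg (by omega)]
        · rw [if_neg hsurv]
          obtain ⟨hno, hov⟩ := not_or.1 hsurv
          obtain ⟨_, _, hg3⟩ := pv_lazy_pop n enemy[i] S (i - j) hS hqS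
            (fun hql => hguard (by omega)) (by omega)
          have hlt : i - j < (List.orderedInsert (· ≤ ·) enemy[i] S).length := by omega
          have hsucc := pv_take_succ_sum _ (i - j) hlt
          have hidx : i + 1 - min (i + 1) k.toNat = (i - j) + 1 := by omega
          rw [hidx, if_pos (by omega)]
          omega
      · rw [if_neg hlast]
        by_cases hover : (S.take (i - j)).sum + enemy[i] > n
        · rw [if_pos hover]
          by_cases hdead : k - (j : Int) ≤ 0
          · rw [if_pos hdead]
            obtain ⟨_, _, hg3⟩ := pv_lazy_pop n enemy[i] S (i - j) hS hqS
              (fun hql => hguard (by omega)) (by omega)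
            have hlt : i - j < (List.orderedInsert (· ≤ ·) enemy[i] S).length := by omega
            have hsucc := pv_take_succ_sum _ (i - j) hlt
            have hidx : i + 1 - min (i + 1) k.toNat = (i - j) + 1 := by omega
            rw [hidx, if_pos (by omega)]
          · rw [if_neg hdead]
            obtain ⟨hP1, hP2, hP3⟩ := pv_lazy_pop n enemy[i] S (i - j) hS hqS
              (fun hql => hguard (by omega)) (by omega)
            have hlastge : enemy[i] ≤ (List.orderedInsert (· ≤ ·) enemy[i] (S.take (i - j))).getLastD 0 :=
              pv_le_getLastD (List.Pairwise.orderedInsert _ _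
                  (List.Pairwise.sublist (List.take_sublist _ _) hS))
                ((List.mem_orderedInsert _).2 (Or.inl rfl))
            have hq' : (S.take (i - j)).sum + enemy[i]
                  - (List.orderedInsert (· ≤ ·) enemy[i] (S.take (i - j))).getLastD 0
                = ((List.orderedInsert (· ≤ ·) enemy[i] S).take (i - j)).sum := hP2
            have hnodeath : ¬ n - ((List.orderedInsert (· ≤ ·) enemy[i] S).take (i + 1 - min (i + 1) k.toNat)).sum < 0 := by
              have h1 : ((List.orderedInsert (· ≤ ·) enemy[i] S).take (i + 1 - min (i + 1) k.toNat)).sum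
                  ≤ ((List.orderedInsert (· ≤ ·) enemy[i] S).take (i - j)).sum :=
                pv_take_sum_mono _ _ _ (by omega) hS'pos
              omega
            rw [if_neg hnodeath]
            have hidx : i + 1 - (j + 1) = i - j := by omega
            have := ih (i + 1) (j + 1) (List.orderedInsert (· ≤ ·) enemy[i] S)
              (by omega) (by omega) (by push_cast; omega) (by omega) hS' hperm'
              (by rw [hidx]; omega)
              (by rw [hidx]; intro _; exact hP3)
            rw [hidx] at this
            have hcast : k - ((j : Int) + 1) = k - (j : Int) - 1 := by ring
            rw [← this]
            simp only [pvIns]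
            rw [hP1, hq']
            push_cast
            rw [hcast]
        · rw [if_neg hover]
          obtain ⟨hK1, hK2⟩ := pv_lazy_keep n enemy[i] S (i - j) hS hqS he
            (fun h => hguard (by omega)) (by omega)
          have htot : (S.take (i - j)).sum + enemy[i]
              = ((List.orderedInsert (· ≤ ·) enemy[i] S).take ((i - j) + 1)).sum := by
            rw [← hK1, pvOI_sum]; ring
          have hnodeath : ¬ n - ((List.orderedInsert (· ≤ ·) enemy[i] S).take (i + 1 - min (i + 1) k.toNat)).sum < 0 := by
            have h1 : ((List.orderedInsert (· ≤ ·) enemy[i] S).take (i + 1 - min (i + 1) k.toNat)).sum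
                ≤ ((List.orderedInsert (· ≤ ·) enemy[i] S).take ((i - j) + 1)).sum :=
              pv_take_sum_mono _ _ _ (by omega) hS'pos
            omega
          rw [if_neg hnodeath]
          have hidx : i + 1 - j = (i - j) + 1 := by omega
          have := ih (i + 1) j (List.orderedInsert (· ≤ ·) enemy[i] S)
            (by omega) (by omega) hjk (by omega) hS' hperm'
            (by rw [hidx]; omega)
            (by rw [hidx]; intro hj; exact hK2 (by omega))
          rw [hidx] at this
          rw [← this]
          simp only [pvIns]
          rw [hK1, htot]
    · have hge : ¬ i < enemy.length := hilen
      rw [pvLazyGo, solBgo, dif_neg hge, dif_neg hge]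

-- k = 0: the lazy pass and B shadow the same running sum wave for wave
lemma pv_k0 (n : Int) (enemy : List Int) :
    ∀ (d i : Nat) (total : Int) (kept : List Int), enemy.length - i ≤ d →
      pvLazyGo n enemy 0 i total kept = solBgo 0 enemy i (n - total) [] := by
  intro d
  induction d with
  | zero =>
    intro i total kept hd
    have hge : ¬ i < enemy.length := by omega
    rw [pvLazyGo, solBgo, dif_neg hge, dif_neg hge]
  | succ d ih =>
    intro i total kept hd
    by_cases hilen : i < enemy.length
    · rw [pvLazyGo, solBgo, dif_pos hilen, dif_pos hilen]
      have hc : ((0 + 1 : Nat) : Int) > (0 : Int) := by norm_num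
      simp only [List.orderedInsert, List.length_cons, List.length_nil,
        List.headD_cons, List.tail_cons, hc, if_true]
      by_cases hlast : i + 1 = enemy.length
      · rw [if_pos hlast]
        by_cases hle : total + enemy[i] ≤ n
        · rw [if_pos (Or.inr hle), if_neg (by omega)]
          rw [solBgo, dif_neg (by omega)]
        · rw [if_neg (by omega), if_pos (by omega)]
          omega
      · rw [if_neg hlast]
        by_cases hover : total + enemy[i] > n
        · rw [if_pos hover, if_pos (by norm_num), if_pos (by omega)]
        · rw [if_neg hover, if_neg (by omega)]
          have := ih (i + 1) (total + enemy[i]) (pvIns kept enemy[i]) (by omega)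
          rw [this]
          congr 1
          ring
    · rw [pvLazyGo, solBgo, dif_neg hilen, dif_neg hilen]

-- k ≥ len: B's heap never overflows, so n is never touched and B returns len
lemma pv_kbig (n k : Int) (enemy : List Int) (hn : 0 ≤ n)
    (hbig : (enemy.length : Int) ≤ k) :
    ∀ (d i : Nat) (heap : List Int), enemy.length - i ≤ d → i ≤ enemy.length →
      heap.length = i → solBgo k enemy i n heap = enemy.length := by
  intro d
  induction d with
  | zero =>
    intro i heap hd hi hlen
    rw [solBgo, dif_neg (by omega)]
  | succ d ih =>
    intro i heap hd hi hlen
    by_cases hilen : i < enemy.length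
    · rw [solBgo, dif_pos hilen]
      have hplen : ((List.orderedInsert (· ≤ ·) enemy[i] heap).length : Int) = (i : Int) + 1 := by
        rw [pvOI_length, hlen]; push_cast; ring
      have hnc : ¬ ((List.orderedInsert (· ≤ ·) enemy[i] heap).length : Int) > k := by omega
      simp only [hnc, if_false]
      rw [if_neg (by omega)]
      exact ih (i + 1) _ (by omega) (by omega) (by rw [pvOI_length, hlen])
    · rw [solBgo, dif_neg hilen]

-- ===== VERDICT (by name: the statement is the Claim_ definition above) =====
theorem solution_spec : Claim_equal_solution := by
  intro n k enemy _ hpre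
  obtain ⟨hn, hk, hcase⟩ := hpre
  unfold Spec_solution solution_alt
  rcases hcase with hk0 | hbig | hpos
  · subst hk0
    rw [pv_solution_lazy n 0 enemy le_rfl (Or.inl hn)]
    have h := pv_k0 n enemy enemy.length 0 0 [] (by omega)
    simpa using h
  · unfold solution
    rw [if_pos (by omega)]
    exact (pv_kbig n k enemy hn hbig enemy.length 0 [] (by omega) (by omega) rfl).symm
  · rw [pv_solution_lazy n k enemy hk (Or.inl hn)]
    have h := pv_main n k enemy hn hk hpos enemy.length 0 0 []
      (by omega) (by omega) (by push_cast; omega) (by omega)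
      List.Pairwise.nil (by simp) (by simp; omega)
      (fun hj => absurd hj (by omega))
    simpa using h
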